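-- pv_equiv track=rewrite | github.com/gpx0214/train-schedule-to-svg | view_train_list.py | unhash_no
-- ===== SOURCE A (Python) =====
-- def unhash_no(n):
--     items = [('Z', 10000), ('T', 20000), ('K', 30000),
--              ('Y', 00000),
--              ('G', 40000), ('D', 50000), ('C', 60000),
--              ('S', 70000),
--              ('L', 80000), ('A', 80000), ('N', 80000),
--              ('P', 10000), ('Q', 20000), ('W', 30000),
--              ('I', 50000),
--              ('V', 1000), ('B', 2000), ('U', 4000), ('X', 5000)]
--     head = ["", "Z", "T", "K", "G", "D", "C", "S", "L"]
--     if n > 90000: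
--         return ""
--     train_class = head[(n-1) // 10000]
--     if n <= 1000:
--         train_class = "Y"
--     for i in range(len(items)):
--         if train_class == items[i][0]:
--             return train_class + str(n-items[i][1])
--     return str(n)
-- ===== SOURCE B (Python) =====
-- def unhash_no(n):
--     if n > 90000:
--         return ""
--     if n <= 1000:
--         return "Y" + str(n)
--     letters = ["", "Z", "T", "K", "G", "D", "C", "S", "L"]
--     m = n
--     i = 0
--     while m > 10000:
--         m -= 10000
--         i += 1
--     letter = letters[i]
--     return str(n) if letter == "" else letter + str(m)
-- ===== Notes on version B (the rewrite author's own statement) =====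
-- stated objective: alternative
-- what changed: Replaces A's division-indexed head lookup plus linear scan of the 19-entry (letter, offset) table by a repeated-subtraction loop: subtract 10000 from n while it exceeds 10000, counting steps to pick the class letter, and print the remainder directly.
import Mathlib
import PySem

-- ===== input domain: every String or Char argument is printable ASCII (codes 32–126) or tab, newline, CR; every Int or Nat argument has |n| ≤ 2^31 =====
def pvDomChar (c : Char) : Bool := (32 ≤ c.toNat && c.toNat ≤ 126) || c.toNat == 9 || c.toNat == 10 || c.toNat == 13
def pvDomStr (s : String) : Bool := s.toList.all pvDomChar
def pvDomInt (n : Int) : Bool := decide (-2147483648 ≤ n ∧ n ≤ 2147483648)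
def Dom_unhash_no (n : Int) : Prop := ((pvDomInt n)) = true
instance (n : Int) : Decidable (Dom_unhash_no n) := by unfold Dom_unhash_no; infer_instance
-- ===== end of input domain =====

-- One line: B decodes the class letter by a repeated-subtraction counting loop instead of
-- A's division-indexed head lookup plus linear scan of the (letter, offset) table (objective: alternative).

-- ===== PORT A =====
-- the 'for i in range(len(items))' loop with early return, transliterated as structural recursion
def unhashLoopA (tc : String) (n : Int) : List (String × Int) → String
  | [] => PySem.Int.toStr n
  | (c, v) :: rest => if tc = c then tc ++ PySem.Int.toStr (n - v) else unhashLoopA tc n rest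

def unhash_no (n : Int) : String :=
  let items : List (String × Int) :=
    [("Z", 10000), ("T", 20000), ("K", 30000),
     ("Y", 0),
     ("G", 40000), ("D", 50000), ("C", 60000),
     ("S", 70000),
     ("L", 80000), ("A", 80000), ("N", 80000),
     ("P", 10000), ("Q", 20000), ("W", 30000),
     ("I", 50000),
     ("V", 1000), ("B", 2000), ("U", 4000), ("X", 5000)]
  let head : List String := ["", "Z", "T", "K", "G", "D", "C", "S", "L"]
  if n > 90000 then ""
  else
    -- head[(n-1)//10000]: IndexError (pyGet? = none) exactly when n ≤ -90000; Pre_ excludes that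
    let train_class0 := PySem.List.pyGetD head (PySem.Int.floordiv (n - 1) 10000) ""
    let train_class := if n ≤ 1000 then "Y" else train_class0
    unhashLoopA train_class n items

-- ===== PORT B =====
-- the 'while m > 10000: m -= 10000; i += 1' loop of Source B, as a recursion decreasing on m
def unhashWhileB (m : Int) (i : Nat) : Int × Nat :=
  if m > 10000 then unhashWhileB (m - 10000) (i + 1) else (m, i)
termination_by m.toNat
decreasing_by omega

def unhash_no_alt (n : Int) : String :=
  if n > 90000 then ""
  else if n ≤ 1000 then "Y" ++ PySem.Int.toStr n
  else
    let letters : List String := ["", "Z", "T", "K", "G", "D", "C", "S", "L"]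
    let mi := unhashWhileB n 0
    -- letters[i]: i is always in range here (n ≤ 90000 bounds the loop at 8 steps)
    let letter := PySem.List.pyGetD letters (Int.ofNat mi.2) ""
    if letter = "" then PySem.Int.toStr n else letter ++ PySem.Int.toStr mi.1

-- ===== PRECONDITION & SPEC =====
-- A raises IndexError (head index (n-1)//10000 below -9) exactly when n ≤ -90000; Pre_ excludes only those inputs.
def Pre_unhash_no (n : Int) : Prop := -90000 < n
instance (n : Int) : Decidable (Pre_unhash_no n) := by unfold Pre_unhash_no; infer_instance
def pvWitness_unhash_no : Int := (5)

def Spec_unhash_no (n : Int) (out : String) : Prop := out = unhash_no_alt n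
instance (n : Int) (out : String) : Decidable (Spec_unhash_no n out) := by unfold Spec_unhash_no; infer_instance

-- ===== CLAIM (what is proved, stated in full; the proofs are below) =====
def Claim_equal_unhash_no : Prop := ∀ (n : Int), Dom_unhash_no n → Pre_unhash_no n → Spec_unhash_no n (unhash_no n)

-- ===== LEMMAS AND PROOFS =====

theorem unhashWhileB_char (k : Nat) : ∀ (m : Int) (i : Nat),
    10000 * (k : Int) < m → m ≤ 10000 * ((k : Int) + 1) →
    unhashWhileB m i = (m - 10000 * k, i + k) := by
  induction k with
  | zero =>
      intro m i h1 h2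
      rw [unhashWhileB]
      simp
      omega
  | succ k ih =>
      intro m i h1 h2
      rw [unhashWhileB, if_pos (by push_cast at h1 ⊢; omega)]
      rw [ih (m - 10000) (i + 1) (by push_cast at h1 ⊢; omega) (by push_cast at h2 ⊢; omega)]
      simp only [Prod.mk.injEq]
      refine ⟨by push_cast; ring, by omega⟩

theorem unhash_no_eq_alt (n : Int) (hpre : -90000 < n) : unhash_no n = unhash_no_alt n := by
  by_cases h1 : n > 90000
  · simp [unhash_no, unhash_no_alt, h1]
  · by_cases h2 : n ≤ 1000
    · rw [unhash_no, unhash_no_alt]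
      simp [unhashLoopA, h1, h2]
    · have hfd : (n - 1).fdiv 10000 = (n - 1) / 10000 := by
        rw [Int.fdiv_eq_ediv]; norm_num
      obtain ⟨k, hk, hk8⟩ : ∃ k : Nat, (n - 1).fdiv 10000 = (k : Int) ∧ k ≤ 8 := by
        refine ⟨((n - 1).fdiv 10000).toNat, by rw [hfd]; omega, by rw [hfd] at *; omega⟩
      have hw := unhashWhileB_char k n 0 (by rw [hfd] at hk; omega) (by rw [hfd] at hk; omega)
      interval_cases k <;>
        simp [unhash_no, unhash_no_alt, unhashLoopA, h1, h2,
              PySem.Int.floordiv, hk, hw, PySem.List.pyGetD]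

-- ===== VERDICT (by name: the statement is the Claim_ definition above) =====
theorem unhash_no_spec : Claim_equal_unhash_no := by
  intro n _ hpre
  exact unhash_no_eq_alt n hpre
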